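-- pv_equiv track=rewrite | github.com/Jester-2-6/s-imply | src/ml/reconv_path_picker_new.py | analyze_path_depth
-- ===== SOURCE A (Python) =====
-- from typing import Any, Dict, List, Optional, Set, Tuple, Union
--
-- def analyze_path_depth(path: List[int], topology: Dict[int, List[int]]) -> int:
--     """Analyze the logical depth of a path through the circuit."""
--     if not path:
--         return 0
--
--     depth = 0
--     visited = set()
--
--     for node in path:
--         if node in visited:
--             depth += 1
--         visited.add(node)
--
--         children = topology.get(node, [])
--         if any(child in path for child in children):
--             depth += 1
--
--     return depth
-- ===== SOURCE B (Python) =====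
-- def analyze_path_depth(path, topology):
--     """Analyze the logical depth of a path through the circuit."""
--     counts = {}
--     for n in path:
--         counts[n] = counts.get(n, 0) + 1
--     revisits = sum(c - 1 for c in counts.values())
--     child_hits = 0
--     for node, children in topology.items():
--         if node in counts and any(ch in counts for ch in children):
--             child_hits += counts[node]
--     return revisits + child_hits
-- ===== Notes on version B (the rewrite author's own statement) =====
-- stated objective: faster
-- what changed: A's single interleaved loop over path (growing a visited set and scanning each node's children against the whole path) is replaced by building a multiplicity counter of path once, summing count-1 over its values for revisits, and a child-hit pass driven by the topology dict that adds each key's path-multiplicity once when one of its children is in the path.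
import Mathlib
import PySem

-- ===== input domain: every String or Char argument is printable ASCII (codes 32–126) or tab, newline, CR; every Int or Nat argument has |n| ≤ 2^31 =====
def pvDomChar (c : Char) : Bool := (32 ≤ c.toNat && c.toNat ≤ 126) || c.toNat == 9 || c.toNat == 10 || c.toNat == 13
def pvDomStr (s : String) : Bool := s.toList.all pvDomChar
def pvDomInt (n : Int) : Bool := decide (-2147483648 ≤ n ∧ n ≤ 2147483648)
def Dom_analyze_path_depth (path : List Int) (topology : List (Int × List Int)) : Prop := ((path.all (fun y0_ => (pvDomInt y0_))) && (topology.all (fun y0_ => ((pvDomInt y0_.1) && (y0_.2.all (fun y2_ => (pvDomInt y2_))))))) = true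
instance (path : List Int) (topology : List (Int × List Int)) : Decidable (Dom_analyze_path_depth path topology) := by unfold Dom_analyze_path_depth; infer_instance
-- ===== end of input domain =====

-- B replaces A's single interleaved visited-set loop over path by a multiplicity
-- counter built once, a revisit sum over the counter's values, and a child-hit pass
-- driven by the TOPOLOGY (each key's count added once when a child is in the path)
-- instead of by the path (objective: faster; constant-factor: the per-node linear
-- child-in-path scans disappear).

-- ===== PORT A =====
-- one step of A's loop body: revisit check, visited.add, child check
def pvStepA (path : List Int) (topology : List (Int × List Int)) (st : Int × PySem.Set Int) (node : Int) : Int × PySem.Set Int :=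
  let depth := if PySem.Set.contains st.2 node then st.1 + 1 else st.1
  let visited := PySem.Set.add st.2 node
  let children := (PySem.Dict.mk topology).getD node []
  let depth := if children.any (fun child => path.contains child) then depth + 1 else depth
  (depth, visited)

def analyze_path_depth (path : List Int) (topology : List (Int × List Int)) : Int :=
  if path = [] then 0
  else (path.foldl (pvStepA path topology) (0, PySem.Set.empty)).1

-- ===== PORT B =====
def analyze_path_depth_alt (path : List Int) (topology : List (Int × List Int)) : Int :=
  let counts : PySem.Dict Int Int :=
    path.foldl (fun d n => d.insert n (d.getD n 0 + 1)) PySem.Dict.empty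
  let revisits : Int := (counts.values.map (fun c => c - 1)).sum
  -- 'for node, children in topology.items()': under Pre_ the association list has
  -- distinct keys, so iterating it is exactly iterating the dict's items
  let child_hits : Int := topology.foldl
    (fun acc p =>
      if counts.contains p.1 && p.2.any (fun ch => counts.contains ch)
      then acc + counts.getD p.1 0 else acc) 0
  revisits + child_hits

-- ===== PRECONDITION & SPEC =====
-- Pre_ requires the topology association list to have distinct keys: a real Python
-- dict argument always satisfies this (duplicate-key association lists are an
-- artifact of the assoc-list encoding of dict and correspond to no Python input).
def Pre_analyze_path_depth (path : List Int) (topology : List (Int × List Int)) : Prop :=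
  (topology.map Prod.fst).Nodup
instance (path : List Int) (topology : List (Int × List Int)) : Decidable (Pre_analyze_path_depth path topology) := by unfold Pre_analyze_path_depth; infer_instance

def pvWitness_analyze_path_depth : List Int × (List (Int × List Int)) :=
  ([1, 2, 1], [(1, [2, 3]), (2, [])])

def Spec_analyze_path_depth (path : List Int) (topology : List (Int × List Int)) (out : Int) : Prop := out = analyze_path_depth_alt path topology
instance (path : List Int) (topology : List (Int × List Int)) (out : Int) : Decidable (Spec_analyze_path_depth path topology out) := by unfold Spec_analyze_path_depth; infer_instance

-- ===== CLAIM (what is proved, stated in full; the proofs are below) =====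
def Claim_equal_analyze_path_depth : Prop := ∀ (path : List Int) (topology : List (Int × List Int)), Dom_analyze_path_depth path topology → Pre_analyze_path_depth path topology → Spec_analyze_path_depth path topology (analyze_path_depth path topology)

-- ===== LEMMAS AND PROOFS =====

-- one step of A's loop, written as the sum of its two increments
theorem pv_stepA_eq (path : List Int) (topology : List (Int × List Int))
    (d : Int) (vis : PySem.Set Int) (n : Int) :
    pvStepA path topology (d, vis) n
      = ((if PySem.Set.contains vis n then d + 1 else d)
          + (if ((PySem.Dict.mk topology).getD n []).any (fun child => path.contains child) then 1 else 0),
         PySem.Set.add vis n) := by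
  simp only [pvStepA]
  split_ifs <;> simp

theorem pv_len_add (s : PySem.Set Int) (x : Int) :
    ((PySem.Set.add s x).length : Int) = if x ∈ s then (s.length : Int) else (s.length : Int) + 1 := by
  by_cases h : x ∈ s
  · simp [PySem.Set.add_of_mem (s := s) h, h]
  · simp [PySem.Set.add_of_not_mem (s := s) h, h]

-- invariant of A's loop: depth = init + revisits-so-far + child hits
theorem pv_foldA (path : List Int) (topology : List (Int × List Int))
    (l : List Int) (vis : PySem.Set Int) (d : Int) :
    (l.foldl (pvStepA path topology) (d, vis)).1
      = d + (l.length : Int) + (vis.length : Int)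
          - ((PySem.Set.update vis l).length : Int)
          + ((l.countP
              (fun n => ((PySem.Dict.mk topology).getD n []).any
                (fun child => path.contains child)) : Nat) : Int) := by
  induction l generalizing vis d with
  | nil => simp [PySem.Set.update]
  | cons n t ih =>
    have hupd : PySem.Set.update vis (n :: t) = PySem.Set.update (PySem.Set.add vis n) t := by
      simp [PySem.Set.update]
    rw [List.foldl_cons, List.countP_cons, hupd, pv_stepA_eq, ih]
    by_cases hv : n ∈ vis <;>
      by_cases hp : ((PySem.Dict.mk topology).getD n []).any (fun child => path.contains child) = true <;>
      simp [hv, hp, pv_len_add, PySem.Set.contains_iff, List.length_cons] <;>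
      push_cast <;> omega

-- sum of multiplicities over the distinct elements is the length
theorem pv_sum_counts (l : List Int) :
    ((PySem.Set.ofList l).map (fun k => ((l.count k : Nat) : Int))).sum = (l.length : Int) := by
  have hperm : (PySem.Set.ofList l).Perm l.dedup := by
    rw [List.perm_ext_iff_of_nodup (PySem.Set.nodup_ofList l) l.nodup_dedup]
    intro a; simp [PySem.Set.mem_ofList, List.mem_dedup]
  have := (hperm.map (fun k => ((l.count k : Nat) : Int))).sum_eq
  rw [this]
  have hnat : (l.dedup.map (fun k => l.count k)).sum = l.length :=
    List.sum_map_count_dedup_eq_length l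
  have : (l.dedup.map (fun k => ((l.count k : Nat) : Int))).sum
      = (((l.dedup.map (fun k => l.count k)).sum : Nat) : Int) := by
    induction l.dedup with
    | nil => simp
    | cons a t ih => simp only [List.map_cons, List.sum_cons, ih]; push_cast; ring
  rw [this, hnat]

-- sum of (c - 1) over a mapped list
theorem pv_sum_sub_one (s : List Int) (f : Int → Int) :
    (s.map (fun k => f k - 1)).sum = (s.map f).sum - (s.length : Int) := by
  induction s with
  | nil => simp
  | cons a t ih => simp [ih]; ring

-- changing a predicate at a single point k where the old one was false
theorem pv_countP_point (l : List Int) (p q : Int → Bool) (k : Int)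
    (h1 : ∀ n, n ≠ k → p n = q n) (h2 : q k = false) :
    l.countP p = l.countP q + (if p k then l.count k else 0) := by
  induction l with
  | nil => simp
  | cons a t ih =>
    rw [List.countP_cons, List.countP_cons, List.count_cons, ih]
    by_cases ha : a = k
    · subst ha; by_cases hp : p a = true <;> simp [hp, h2] <;> omega
    · rw [h1 a ha]
      by_cases hq : q a = true <;> by_cases hp : p k = true <;>
        simp [hq, hp, ha] <;> omega

-- shifting the accumulator out of B's child-hit fold
theorem pv_foldB_acc (path : List Int) (topology : List (Int × List Int)) (acc : Int) :
    topology.foldl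
      (fun a p =>
        if path.contains p.1 && p.2.any (fun ch => path.contains ch)
        then a + ((path.count p.1 : Nat) : Int) else a) acc
      = acc + topology.foldl
      (fun a p =>
        if path.contains p.1 && p.2.any (fun ch => path.contains ch)
        then a + ((path.count p.1 : Nat) : Int) else a) 0 := by
  induction topology generalizing acc with
  | nil => simp
  | cons p t ih =>
    simp only [List.foldl_cons]
    by_cases hg : (path.contains p.1 && p.2.any (fun ch => path.contains ch)) = true
    · simp only [hg, if_true]
      rw [ih (acc + ((path.count p.1 : Nat) : Int)), ih (0 + ((path.count p.1 : Nat) : Int))]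
      ring
    · simp only [Bool.not_eq_true] at hg
      simp only [hg, Bool.false_eq_true, if_false]
      exact ih acc

-- B's topology-driven child-hit fold equals A's path-driven child-hit count
theorem pv_child_hits (path : List Int) (topology : List (Int × List Int))
    (hnd : (topology.map Prod.fst).Nodup) :
    topology.foldl
      (fun acc p =>
        if path.contains p.1 && p.2.any (fun ch => path.contains ch)
        then acc + ((path.count p.1 : Nat) : Int) else acc) 0
    = ((path.countP
        (fun n => ((PySem.Dict.mk topology).getD n []).any
          (fun child => path.contains child)) : Nat) : Int) := by
  induction topology with
  | nil =>
    simp [PySem.Dict.getD, PySem.Dict.get?, PySem.Dict.mk]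
  | cons p t ih =>
    obtain ⟨k, cs⟩ := p
    simp only [List.map_cons, List.nodup_cons] at hnd
    obtain ⟨hk, hnd'⟩ := hnd
    have hrest : ∀ n, (PySem.Dict.mk ((k, cs) :: t)).getD n []
        = if n = k then cs else (PySem.Dict.mk t).getD n [] := by
      intro n
      rw [PySem.Dict.getD_eq_get?_getD, PySem.Dict.getD_eq_get?_getD,
        PySem.Dict.get?_mk_cons]
      by_cases h : n = k
      · simp [h]
      · have : (k == n) = false := by simp [Ne.symm h]
        simp [this, h]
    have hkrest : (PySem.Dict.mk t).getD k [] = [] := by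
      rw [PySem.Dict.getD_eq_get?_getD]
      have : (PySem.Dict.mk t).get? k = none := by
        rw [PySem.Dict.get?_eq_none_iff_not_mem_keys]
        simpa [PySem.Dict.keys, PySem.Dict.mk] using hk
      simp [this]
    rw [List.foldl_cons]
    rw [pv_foldB_acc path t _, ih hnd']
    have hcount := pv_countP_point path
      (fun n => ((PySem.Dict.mk ((k, cs) :: t)).getD n []).any
        (fun child => path.contains child))
      (fun n => ((PySem.Dict.mk t).getD n []).any
        (fun child => path.contains child)) k
      (by intro n hn; simp only [hrest n, if_neg hn])
      (by simp [hkrest])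
    rw [hcount]
    have hself : ((PySem.Dict.mk ((k, cs) :: t)).getD k []) = cs := by
      simp [hrest k]
    simp only [hself]
    cases hck : path.contains k with
    | false =>
      have hc0 : path.count k = 0 := by
        rw [List.count_eq_zero]
        simpa using hck
      cases hany : cs.any (fun ch => path.contains ch) <;>
        simp [hck, hany, hc0]
    | true =>
      cases hany : cs.any (fun ch => path.contains ch) <;>
        simp [hck, hany] <;> push_cast <;> ring

-- ===== VERDICT (by name: the statement is the Claim_ definition above) =====
theorem analyze_path_depth_spec : Claim_equal_analyze_path_depth := by
  intro path topology _ hpre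
  show analyze_path_depth path topology = analyze_path_depth_alt path topology
  unfold analyze_path_depth analyze_path_depth_alt
  dsimp only
  rw [PySem.Dict.foldl_insert_getD_add_one_eq_counter]
  have hvals : (PySem.Dict.counter path : PySem.Dict Int Int).values
      = (PySem.Set.ofList path).map (fun k => ((path.count k : Nat) : Int)) := by
    have : (PySem.Dict.counter path : PySem.Dict Int Int).values
        = (PySem.Dict.counter path : PySem.Dict Int Int).items.map (·.2) := rfl
    rw [this, PySem.Dict.items_counter, List.map_map]
    rfl
  have hrev : (((PySem.Dict.counter path : PySem.Dict Int Int).values.map (fun c => c - 1)).sum : Int)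
      = (path.length : Int) - ((PySem.Set.ofList path).length : Int) := by
    rw [hvals, List.map_map]
    simp only [Function.comp_def]
    rw [pv_sum_sub_one (PySem.Set.ofList path) (fun k => ((path.count k : Nat) : Int)),
      pv_sum_counts]
  have hcontains : ∀ x, (PySem.Dict.counter path : PySem.Dict Int Int).contains x = path.contains x := by
    intro x; exact PySem.Dict.contains_counter path x
  have hgetD : ∀ x, (PySem.Dict.counter path : PySem.Dict Int Int).getD x 0 = ((path.count x : Nat) : Int) := by
    intro x; exact PySem.Dict.getD_counter path x
  have hch : topology.foldl
      (fun acc p =>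
        if (PySem.Dict.counter path : PySem.Dict Int Int).contains p.1
            && p.2.any (fun ch => (PySem.Dict.counter path : PySem.Dict Int Int).contains ch)
        then acc + (PySem.Dict.counter path : PySem.Dict Int Int).getD p.1 0 else acc) 0
      = topology.foldl
      (fun acc p =>
        if path.contains p.1 && p.2.any (fun ch => path.contains ch)
        then acc + ((path.count p.1 : Nat) : Int) else acc) 0 := by
    congr 1
    funext acc p
    simp only [hcontains, hgetD]
  by_cases h : path = []
  · subst h
    rw [if_pos rfl, hrev, hch, pv_child_hits [] topology hpre]
    simp
  · rw [if_neg h, pv_foldA, hrev, hch, pv_child_hits path topology hpre]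
    have hof : PySem.Set.update (PySem.Set.empty : PySem.Set Int) path = PySem.Set.ofList path := by
      simp [PySem.Set.update, PySem.Set.ofList_eq_foldl, PySem.Set.empty]
    rw [hof]
    simp only [PySem.Set.empty, List.length_nil, Nat.cast_zero]
    omega
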